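-- pv_equiv track=rewrite | github.com/yesongO/coding_test | 프로그래머스/0/181881. 조건에 맞게 수열 변환하기 2/조건에 맞게 수열 변환하기 2.py | solution
-- ===== SOURCE A (Python) =====
-- def solution(arr):
--     prv = arr[:]
--     x = 0
--     while True:
--         nxt = []
--         for i in prv:
--             if i >= 50 and i % 2 == 0:
--                 nxt.append(i // 2)
--             elif i < 50 and i % 2 != 0:
--                 nxt.append(i * 2 + 1)
--             else:
--                 nxt.append(i)
--         if prv == nxt:
--             break
--         prv = nxt[:]
--         x += 1
--     return x
-- ===== SOURCE B (Python) =====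
-- def solution(arr):
--     def steps(v):
--         c = 0
--         while True:
--             if v >= 50 and v % 2 == 0:
--                 w = v // 2
--             elif v < 50 and v % 2 != 0:
--                 w = v * 2 + 1
--             else:
--                 w = v
--             if w == v:
--                 return c
--             v = w
--             c += 1
--     return max((steps(v) for v in arr), default=0)
-- ===== Notes on version B (the rewrite author's own statement) =====
-- stated objective: alternative
-- what changed: Instead of repeatedly rebuilding the whole array and comparing it with the previous one, B computes each element's own convergence step count independently and returns the maximum (0 for an empty array), since the elements evolve independently under the same rule.
import Mathlib
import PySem

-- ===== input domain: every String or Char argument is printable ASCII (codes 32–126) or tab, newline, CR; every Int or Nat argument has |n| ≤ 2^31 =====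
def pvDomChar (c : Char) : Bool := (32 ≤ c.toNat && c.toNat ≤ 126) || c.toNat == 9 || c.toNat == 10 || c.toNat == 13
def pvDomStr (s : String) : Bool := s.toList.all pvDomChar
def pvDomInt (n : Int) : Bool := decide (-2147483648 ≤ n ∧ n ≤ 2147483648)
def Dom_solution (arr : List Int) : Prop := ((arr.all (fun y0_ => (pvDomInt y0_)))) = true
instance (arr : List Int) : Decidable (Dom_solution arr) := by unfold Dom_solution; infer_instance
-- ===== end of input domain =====

-- B replaces A's repeated whole-array rebuild-and-compare by an independent per-element
-- convergence count and a max reduction; return values only (A does not mutate arr).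
-- Both loops are ported with a fuel guard (totality only): 2^31 + 64 steps suffice for
-- every element admitted by Dom_solution ∧ Pre_solution, proved below.

-- ===== PORT A =====
def solutionLoop : Nat → List Int → Int → Int
  | 0, _, x => x
  | fuel+1, prv, x =>
      let nxt := prv.foldl (fun nxt i =>
        if 50 ≤ i ∧ PySem.Int.mod i 2 = 0 then nxt ++ [PySem.Int.floordiv i 2]
        else if i < 50 ∧ PySem.Int.mod i 2 ≠ 0 then nxt ++ [i * 2 + 1]
        else nxt ++ [i]) []
      if prv = nxt then x else solutionLoop fuel nxt (x + 1)

def solution (arr : List Int) : Int := solutionLoop 2147483712 arr 0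

-- ===== PORT B =====
def stepsLoop : Nat → Int → Int → Int
  | 0, _, c => c
  | fuel+1, v, c =>
      let w := if 50 ≤ v ∧ PySem.Int.mod v 2 = 0 then PySem.Int.floordiv v 2
               else if v < 50 ∧ PySem.Int.mod v 2 ≠ 0 then v * 2 + 1
               else v
      if w = v then c else stepsLoop fuel w (c + 1)

def solution_alt (arr : List Int) : Int :=
  PySem.List.maxD (arr.map (fun v => stepsLoop 2147483712 v 0)) (fun y => y) 0

-- ===== PRECONDITION & SPEC =====
-- Pre_ excludes arrays containing an odd element ≤ -3: there A's while-loop (and B's) never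
-- terminates (the element keeps strictly decreasing under v*2+1), so A returns no value.
def Pre_solution (arr : List Int) : Prop := ∀ v ∈ arr, -1 ≤ v ∨ PySem.Int.mod v 2 = 0
instance (arr : List Int) : Decidable (Pre_solution arr) := by unfold Pre_solution; infer_instance
def pvWitness_solution : List Int := [1, 100, -4, 0]

def Spec_solution (arr : List Int) (out : Int) : Prop := out = solution_alt arr
instance (arr : List Int) (out : Int) : Decidable (Spec_solution arr out) := by unfold Spec_solution; infer_instance

-- ===== CLAIM (what is proved, stated in full; the proofs are below) =====
def Claim_equal_solution : Prop := ∀ (arr : List Int), Dom_solution arr → Pre_solution arr → Spec_solution arr (solution arr)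

-- ===== LEMMAS AND PROOFS =====

-- the one-element transformation, in plain Int arithmetic
def step' (v : Int) : Int :=
  if 50 ≤ v ∧ v % 2 = 0 then v / 2 else if v < 50 ∧ v % 2 ≠ 0 then v * 2 + 1 else v

theorem mod2_eq (a : Int) : PySem.Int.mod a 2 = a % 2 :=
  PySem.Int.mod_eq_emod_of_pos (by norm_num)

theorem fdiv2_eq (a : Int) : PySem.Int.floordiv a 2 = a / 2 :=
  PySem.Int.floordiv_eq_ediv_of_pos (by norm_num)

theorem body_eq_map (l acc : List Int) :
    l.foldl (fun nxt i =>
        if 50 ≤ i ∧ PySem.Int.mod i 2 = 0 then nxt ++ [PySem.Int.floordiv i 2]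
        else if i < 50 ∧ PySem.Int.mod i 2 ≠ 0 then nxt ++ [i * 2 + 1]
        else nxt ++ [i]) acc = acc ++ l.map step' := by
  have hf : (fun (nxt : List Int) i =>
        if 50 ≤ i ∧ PySem.Int.mod i 2 = 0 then nxt ++ [PySem.Int.floordiv i 2]
        else if i < 50 ∧ PySem.Int.mod i 2 ≠ 0 then nxt ++ [i * 2 + 1]
        else nxt ++ [i]) = (fun nxt i => nxt ++ [step' i]) := by
    funext nxt i
    simp only [mod2_eq, fdiv2_eq, step']
    split_ifs <;> rfl
  rw [hf]
  induction l generalizing acc with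
  | nil => simp
  | cons a t ih => simp [List.foldl_cons, ih]

theorem stepsLoop_unfold (fuel : Nat) (v c : Int) :
    stepsLoop (fuel + 1) v c = if step' v = v then c else stepsLoop fuel (step' v) (c + 1) := by
  have hw : (if 50 ≤ v ∧ PySem.Int.mod v 2 = 0 then PySem.Int.floordiv v 2
             else if v < 50 ∧ PySem.Int.mod v 2 ≠ 0 then v * 2 + 1 else v) = step' v := by
    simp only [mod2_eq, fdiv2_eq, step']
  rw [stepsLoop, hw]

theorem stepsLoop_acc (fuel : Nat) : ∀ v c, stepsLoop fuel v c = c + stepsLoop fuel v 0 := by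
  induction fuel with
  | zero => intro v c; simp [stepsLoop]
  | succ n ih =>
      intro v c
      rw [stepsLoop_unfold, stepsLoop_unfold]
      split_ifs with h
      · simp
      · rw [ih _ (c + 1), ih _ (0 + 1)]; ring

theorem stepsLoop_succ (fuel : Nat) (v : Int) :
    stepsLoop (fuel + 1) v 0 = if step' v = v then 0 else 1 + stepsLoop fuel (step' v) 0 := by
  rw [stepsLoop_unfold]
  split_ifs with h
  · rfl
  · rw [stepsLoop_acc]; ring

theorem stepsLoop_nonneg (fuel : Nat) : ∀ v c, 0 ≤ c → 0 ≤ stepsLoop fuel v c := by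
  induction fuel with
  | zero => intro v c hc; simpa [stepsLoop] using hc
  | succ n ih =>
      intro v c hc
      rw [stepsLoop_unfold]
      split_ifs
      · exact hc
      · exact ih _ _ (by omega)

theorem stepsLoop_fixed (fuel : Nat) (v : Int) (h : step' v = v) : stepsLoop fuel v 0 = 0 := by
  cases fuel with
  | zero => simp [stepsLoop]
  | succ n => rw [stepsLoop_unfold, if_pos h]

-- running max over a list of ints, starting at 0
def maxL (l : List Int) : Int := l.foldl max 0

theorem maxL_nonneg (l : List Int) : 0 ≤ maxL l := (PySem.List.le_foldl_max l 0).1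

theorem le_maxL (l : List Int) {y : Int} (hy : y ∈ l) : y ≤ maxL l :=
  (PySem.List.le_foldl_max l 0).2 y hy

theorem maxL_le (l : List Int) {m : Int} (h0 : 0 ≤ m) (h : ∀ y ∈ l, y ≤ m) : maxL l ≤ m := by
  rcases PySem.List.foldl_max_mem l 0 with hm | hm
  · rw [maxL, hm]; exact h0
  · exact h _ hm

theorem maxL_zero (l : List Int) (h : ∀ y ∈ l, y = (0 : Int)) : maxL l = 0 :=
  le_antisymm (maxL_le l le_rfl (fun y hy => le_of_eq (h y hy))) (maxL_nonneg l)

theorem maxD_eq_maxL (l : List Int) (h : ∀ y ∈ l, 0 ≤ y) :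
    PySem.List.maxD l (fun y => y) 0 = maxL l := by
  cases l with
  | nil => simp [PySem.List.maxD, PySem.List.max?, maxL]
  | cons x t =>
      have hx : max 0 x = x := max_eq_right (h x (by simp))
      simp [PySem.List.maxD, PySem.List.max?_id_cons, maxL, List.foldl_cons, hx]

theorem map_eq_self_of_fixed {f : Int → Int} :
    ∀ l : List Int, (∀ v ∈ l, f v = v) → l.map f = l := by
  intro l h
  induction l with
  | nil => rfl
  | cons a t ih => simp [h a (by simp), ih (fun v hv => h v (by simp [hv]))]

theorem fixed_of_map_eq_self {f : Int → Int} :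
    ∀ l : List Int, l.map f = l → ∀ v ∈ l, f v = v := by
  intro l
  induction l with
  | nil => intro _ v hv; cases hv
  | cons a t ih =>
      intro h v hv
      simp only [List.map_cons, List.cons.injEq] at h
      rcases List.mem_cons.1 hv with hv | hv
      · rw [hv]; exact h.1
      · exact ih h.2 v hv

-- the central max identity for one unfolding of the loop
theorem maxL_shift (fuel : Nat) (prv : List Int)
    (hne : ∃ u ∈ prv, step' u ≠ u) :
    maxL (prv.map (fun v => stepsLoop (fuel + 1) v 0)) =
      1 + maxL (prv.map (fun v => stepsLoop fuel (step' v) 0)) := by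
  set t : Int → Int := fun v => stepsLoop fuel (step' v) 0 with ht
  have htn : ∀ v, 0 ≤ t v := fun v => stepsLoop_nonneg fuel _ 0 le_rfl
  have hg : ∀ v, stepsLoop (fuel + 1) v 0 = if step' v = v then 0 else 1 + t v :=
    fun v => stepsLoop_succ fuel v
  have hRn : 0 ≤ maxL (prv.map t) := maxL_nonneg _
  apply le_antisymm
  · apply maxL_le _ (by omega)
    intro y hy
    rcases List.mem_map.1 hy with ⟨v, hv, rfl⟩
    rw [hg v]
    split_ifs with h
    · omega
    · have : t v ≤ maxL (prv.map t) := le_maxL _ (List.mem_map.2 ⟨v, hv, rfl⟩)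
      omega
  · rcases hne with ⟨u, hu, hus⟩
    have hgu : stepsLoop (fuel + 1) u 0 = 1 + t u := by rw [hg u]; simp [hus]
    have hule : stepsLoop (fuel + 1) u 0 ≤ maxL (prv.map (fun v => stepsLoop (fuel + 1) v 0)) :=
      le_maxL _ (List.mem_map.2 ⟨u, hu, rfl⟩)
    rcases PySem.List.foldl_max_mem (prv.map t) 0 with hm | hm
    · have : maxL (prv.map t) = 0 := hm
      have := htn u
      omega
    · rcases List.mem_map.1 hm with ⟨v, hv, hveq⟩
      by_cases hvf : step' v = v
      · have htv : t v = 0 := by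
          rw [ht]; simp only [hvf]; exact stepsLoop_fixed fuel v hvf
        have hz : maxL (prv.map t) = 0 := by rw [maxL, ← hveq, htv]
        have := htn u
        omega
      · have hgv : stepsLoop (fuel + 1) v 0 = 1 + t v := by rw [hg v]; simp [hvf]
        have hvle : stepsLoop (fuel + 1) v 0 ≤ maxL (prv.map (fun w => stepsLoop (fuel + 1) w 0)) :=
          le_maxL _ (List.mem_map.2 ⟨v, hv, rfl⟩)
        have hmx : maxL (prv.map t) = t v := hveq.symm
        omega

-- element v has converged after n applications of step'
def Settles (n : Nat) (v : Int) : Prop := step' (step'^[n] v) = step'^[n] v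

-- termination measure for one element
def M (v : Int) : Nat := (if 50 ≤ v then v else 50 - v).toNat

theorem settles_of_measure :
    ∀ n v, (-1 ≤ v ∨ v % 2 = 0) → (step' v = v ∨ M v ≤ n) → Settles n v := by
  intro n
  induction n with
  | zero =>
      intro v hok h
      rcases h with h | h
      · simpa [Settles, Function.iterate_fixed h] using h
      · exfalso
        unfold M at h
        split_ifs at h <;> omega
  | succ m ih =>
      intro v hok h
      by_cases hf : step' v = v
      · simpa [Settles, Function.iterate_fixed hf] using hf
      · have hM : M v ≤ m + 1 := by rcases h with h | h; exact absurd h hf; exact h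
        have key : Settles m (step' v) := by
          by_cases h1 : 50 ≤ v ∧ v % 2 = 0
          · have hw : step' v = v / 2 := by unfold step'; rw [if_pos h1]
            apply ih
            · left; omega
            · right
              rw [hw]; unfold M at hM ⊢
              split_ifs at hM ⊢ <;> omega
          · by_cases h2 : v < 50 ∧ v % 2 ≠ 0
            · have hw : step' v = v * 2 + 1 := by unfold step'; rw [if_neg h1, if_pos h2]
              have hv0 : 0 ≤ v := by
                rcases hok with hv | hv
                · have : v ≠ -1 := by intro hv1; apply hf; rw [hw, hv1]; norm_num
                  omega
                · exact absurd hv h2.2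
              by_cases h50 : 50 ≤ v * 2 + 1
              · apply ih
                · left; omega
                · left
                  rw [hw]; unfold step'
                  rw [if_neg (by omega), if_neg (by omega)]
              · apply ih
                · left; omega
                · right
                  rw [hw]; unfold M at hM ⊢
                  split_ifs at hM ⊢ <;> omega
            · exfalso; apply hf; unfold step'; rw [if_neg h1, if_neg h2]
        unfold Settles at key ⊢
        rwa [Function.iterate_succ_apply]

theorem settles_step {n : Nat} {v : Int} (h : Settles (n + 1) v) : Settles n (step' v) := by
  unfold Settles at h ⊢
  rwa [Function.iterate_succ_apply] at h

-- the main loop invariant: A's counter equals the max of the per-element counters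
theorem loop_eq :
    ∀ (fuel : Nat) (prv : List Int) (x : Int), (∀ v ∈ prv, Settles fuel v) →
      solutionLoop fuel prv x = x + maxL (prv.map (fun v => stepsLoop fuel v 0)) := by
  intro fuel
  induction fuel with
  | zero =>
      intro prv x _
      have : maxL (prv.map (fun v => stepsLoop 0 v 0)) = 0 := by
        apply maxL_zero
        intro y hy
        rcases List.mem_map.1 hy with ⟨v, _, rfl⟩
        simp [stepsLoop]
      simp [solutionLoop, this]
  | succ n ih =>
      intro prv x hset
      rw [solutionLoop]
      simp only [body_eq_map prv [], List.nil_append]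
      by_cases hfix : prv = prv.map step'
      · rw [if_pos hfix]
        have hz : maxL (prv.map (fun v => stepsLoop (n + 1) v 0)) = 0 := by
          apply maxL_zero
          intro y hy
          rcases List.mem_map.1 hy with ⟨v, hv, rfl⟩
          exact stepsLoop_fixed _ v (fixed_of_map_eq_self prv hfix.symm v hv)
        omega
      · rw [if_neg hfix]
        have hne : ∃ u ∈ prv, step' u ≠ u := by
          by_contra hno
          push Not at hno
          exact hfix (map_eq_self_of_fixed prv hno).symm
        rw [ih (prv.map step') (x + 1)
              (by intro w hw
                  rcases List.mem_map.1 hw with ⟨v, hv, rfl⟩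
                  exact settles_step (hset v hv))]
        rw [List.map_map]
        have hcomp : ((fun v => stepsLoop n v 0) ∘ step') = (fun v => stepsLoop n (step' v) 0) := rfl
        rw [hcomp, maxL_shift n prv hne]
        omega

theorem settles_big {v : Int} (hd : -2147483648 ≤ v ∧ v ≤ 2147483648)
    (hok : -1 ≤ v ∨ PySem.Int.mod v 2 = 0) : Settles 2147483712 v := by
  apply settles_of_measure
  · rwa [mod2_eq] at hok
  · right; unfold M; split_ifs <;> omega

-- ===== VERDICT (by name: the statement is the Claim_ definition above) =====
theorem solution_spec : Claim_equal_solution := by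
  intro arr hdom hpre
  unfold Spec_solution solution solution_alt
  have hall : ∀ v ∈ arr, Settles 2147483712 v := by
    intro v hv
    have hd := List.all_eq_true.1 hdom v hv
    simp only [pvDomInt, decide_eq_true_eq] at hd
    exact settles_big hd (hpre v hv)
  rw [loop_eq _ arr 0 hall, maxD_eq_maxL]
  · simp
  · intro y hy
    rcases List.mem_map.1 hy with ⟨v, _, rfl⟩
    exact stepsLoop_nonneg _ _ 0 le_rfl
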